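-- pv_equiv track=rewrite | github.com/Stoupy51/python_datapack | src/python_datapack/continuous_delivery/github.py | version_to_int
-- ===== SOURCE A (Python) =====
-- def version_to_int(version: str) -> int:
-- 	""" Version format: major.minor.patch.something_else.... infinitely """
-- 	for letter in "vabr":
-- 		version = version.replace(letter, "")
-- 	version_parts: list[str] = version.split(".")
-- 	total: int = 0
-- 	multiplier: int = 1
-- 	for part in version_parts[::-1]:
-- 		try:
-- 			total += int(part) * multiplier
-- 			multiplier *= 1_000_000	# It means 1 million possible version by dot
-- 		except ValueError:
-- 			pass
-- 	return total
-- ===== SOURCE B (Python) =====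
-- def version_to_int(version: str) -> int:
-- 	""" Version format: major.minor.patch.something_else.... infinitely """
-- 	for letter in "vabr":
-- 		version = version.replace(letter, "")
-- 	nums: list[int] = []
-- 	for part in version.split("."):
-- 		try:
-- 			nums.append(int(part))
-- 		except ValueError:
-- 			pass
-- 	return sum(n * 1_000_000 ** i for i, n in enumerate(reversed(nums)))
-- ===== Notes on version B (the rewrite author's own statement) =====
-- stated objective: simpler
-- what changed: Replaces the single reversed loop threading a mutable multiplier with two passes: collect the parts that parse as int, then a closed weighted sum with positional weights 1_000_000**i over the reversed list of valid ints.
import Mathlib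
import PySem

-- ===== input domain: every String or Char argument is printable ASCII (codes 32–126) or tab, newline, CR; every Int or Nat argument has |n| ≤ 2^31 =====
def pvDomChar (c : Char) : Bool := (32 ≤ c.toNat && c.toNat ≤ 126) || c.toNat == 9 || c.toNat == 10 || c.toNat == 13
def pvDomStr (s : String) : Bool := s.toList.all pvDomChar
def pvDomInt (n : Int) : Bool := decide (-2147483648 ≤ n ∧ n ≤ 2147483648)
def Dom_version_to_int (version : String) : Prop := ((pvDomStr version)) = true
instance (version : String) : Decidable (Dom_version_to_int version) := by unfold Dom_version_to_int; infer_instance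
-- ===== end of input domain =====

-- B is a simpler two-pass decomposition (filter the int-parsing parts, then a positional weighted sum); same cost as A.

-- ===== PORT A =====
def version_to_int (version : String) : Int :=
  -- for letter in "vabr": version = version.replace(letter, "")
  let version := "vabr".toList.foldl (fun v letter => PySem.Str.replace v (String.ofList [letter]) "") version
  -- version_parts = version.split(".")
  let version_parts := (PySem.Str.split? version ".").getD []
  -- loop over version_parts[::-1] with state (total, multiplier)
  let st := ((PySem.List.slice? version_parts none none (-1)).getD []).foldl
    (fun (st : Int × Int) part =>
      match PySem.Int.ofStr? part with
      | some n => (st.1 + n * st.2, st.2 * 1000000)   -- try: total += int(part)*multiplier; multiplier *= 1_000_000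
      | none => st)                                    -- except ValueError: pass
    (0, 1)
  st.1

-- ===== PORT B =====
def version_to_int_alt (version : String) : Int :=
  let version := "vabr".toList.foldl (fun v letter => PySem.Str.replace v (String.ofList [letter]) "") version
  -- nums = []; for part in version.split("."): try: nums.append(int(part)) except ValueError: pass
  let nums := ((PySem.Str.split? version ".").getD []).foldl
    (fun (acc : List Int) part =>
      match PySem.Int.ofStr? part with
      | some n => acc ++ [n]
      | none => acc) []
  -- sum(n * 1_000_000 ** i for i, n in enumerate(reversed(nums)))
  (PySem.List.enumerate nums.reverse).foldl (fun acc p => acc + p.2 * (1000000 : Int) ^ p.1.toNat) 0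

-- ===== PRECONDITION & SPEC =====
def Spec_version_to_int (version : String) (out : Int) : Prop := out = version_to_int_alt version
instance (version : String) (out : Int) : Decidable (Spec_version_to_int version out) := by unfold Spec_version_to_int; infer_instance

-- ===== CLAIM (what is proved, stated in full; the proofs are below) =====
def Claim_equal_version_to_int : Prop := ∀ (version : String), Dom_version_to_int version → Spec_version_to_int version (version_to_int version)

-- ===== LEMMAS AND PROOFS =====

-- the weighted sum B computes, as a recursion (weight 1 at the head, ×1_000_000 per step)
def pvWSum : List Int → Int
  | [] => 0
  | n :: rest => n + 1000000 * pvWSum rest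

theorem pvWSum_enumerate_foldl (l : List Int) (k : Nat) (acc : Int) :
    (PySem.List.enumerate l (k : Int)).foldl (fun acc p => acc + p.2 * (1000000 : Int) ^ p.1.toNat) acc
      = acc + (1000000 : Int) ^ k * pvWSum l := by
  induction l generalizing k acc with
  | nil => simp [PySem.List.enumerate_nil, pvWSum]
  | cons n rest ih =>
    have hk : ((k : Int) + 1) = ((k + 1 : Nat) : Int) := by push_cast; ring
    simp only [PySem.List.enumerate_cons, List.foldl_cons, hk, ih, Int.toNat_natCast, pvWSum,
      pow_succ]
    ring

theorem pvA_foldl (l : List String) (t m : Int) :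
    (l.foldl (fun (st : Int × Int) part =>
        match PySem.Int.ofStr? part with
        | some n => (st.1 + n * st.2, st.2 * 1000000)
        | none => st) (t, m)).1
      = t + m * pvWSum (l.filterMap PySem.Int.ofStr?) := by
  induction l generalizing t m with
  | nil => simp [pvWSum]
  | cons p rest ih =>
    cases h : PySem.Int.ofStr? p with
    | none => simp [h, ih]
    | some n =>
      simp only [List.foldl_cons, h, List.filterMap_cons, ih, pvWSum]
      ring

-- B's append-loop collects exactly the filterMap of the parts
theorem pvB_collect (l : List String) (acc : List Int) :
    l.foldl (fun (acc : List Int) part =>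
        match PySem.Int.ofStr? part with
        | some n => acc ++ [n]
        | none => acc) acc = acc ++ l.filterMap PySem.Int.ofStr? := by
  induction l generalizing acc with
  | nil => simp
  | cons p rest ih => cases h : PySem.Int.ofStr? p <;> simp [h, ih]

-- ===== VERDICT (by name: the statement is the Claim_ definition above) =====
theorem version_to_int_spec : Claim_equal_version_to_int := by
  intro version _
  unfold Spec_version_to_int version_to_int version_to_int_alt
  simp only [PySem.List.slice?_none_none_neg_one, Option.getD_some]
  rw [pvA_foldl, pvB_collect]
  have h0 : ((0 : Nat) : Int) = (0 : Int) := rfl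
  rw [List.nil_append, ← h0, pvWSum_enumerate_foldl]
  simp [List.filterMap_reverse]
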